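-- pv_equiv track=rewrite | github.com/ognjhunt/BlueprintPipeline | tools/geniesim_adapter/task_config.py | _normalize_required_camera_ids
-- ===== SOURCE A (Python) =====
-- from typing import Any, Dict, List, Mapping, Optional, Tuple
--
-- CANONICAL_REQUIRED_CAMERA_IDS: List[str] = ["left", "right", "wrist"]
--
-- _CAMERA_ALIAS_TO_CANONICAL: Dict[str, str] = {
--     "left": "left",
--     "left_wrist": "left",
--     "side": "left",
--     "right": "right",
--     "head": "right",
--     "overhead": "right",
--     "wrist": "wrist",
--     "hand": "wrist",
--     "eye_in_hand": "wrist",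
-- }
--
-- def _normalize_required_camera_ids(camera_ids: Optional[List[str]]) -> List[str]:
--     normalized: List[str] = []
--     for camera_id in (camera_ids or []):
--         alias = str(camera_id).strip().lower()
--         if not alias:
--             continue
--         canonical = _CAMERA_ALIAS_TO_CANONICAL.get(alias, alias)
--         if canonical in CANONICAL_REQUIRED_CAMERA_IDS and canonical not in normalized:
--             normalized.append(canonical)
--     for required in CANONICAL_REQUIRED_CAMERA_IDS:
--         if required not in normalized:
--             normalized.append(required)
--     return normalized
-- ===== SOURCE B (Python) =====
-- from typing import Dict, List, Optional
--
-- CANONICAL_REQUIRED_CAMERA_IDS: List[str] = ["left", "right", "wrist"]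
--
-- _CAMERA_ALIAS_TO_CANONICAL: Dict[str, str] = {
--     "left": "left",
--     "left_wrist": "left",
--     "side": "left",
--     "right": "right",
--     "head": "right",
--     "overhead": "right",
--     "wrist": "wrist",
--     "hand": "wrist",
--     "eye_in_hand": "wrist",
-- }
--
-- def _normalize_required_camera_ids(camera_ids: Optional[List[str]]) -> List[str]:
--     # One pass: record the first-appearance rank of each valid canonical id,
--     # then sort the fixed canonical list by that rank (unseen ids keep
--     # canonical order via the past-the-end fallback key; sort is stable).
--     order: Dict[str, int] = {}
--     for camera_id in (camera_ids or []):
--         alias = str(camera_id).strip().lower()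
--         canonical = _CAMERA_ALIAS_TO_CANONICAL.get(alias, alias)
--         if canonical in CANONICAL_REQUIRED_CAMERA_IDS and canonical not in order:
--             order[canonical] = len(order)
--     return sorted(CANONICAL_REQUIRED_CAMERA_IDS,
--                   key=lambda c: order.get(c, len(CANONICAL_REQUIRED_CAMERA_IDS)))
-- ===== Notes on version B (the rewrite author's own statement) =====
-- stated objective: alternative
-- what changed: Replaces A's two append loops (dedup-append pass plus a backfill pass over the canonical list) with a build-table-then-sort shape: one pass records each valid canonical id's first-appearance rank in a dict, and the result is the fixed canonical list stably sorted by that rank with a past-the-end fallback key.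
import Mathlib
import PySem

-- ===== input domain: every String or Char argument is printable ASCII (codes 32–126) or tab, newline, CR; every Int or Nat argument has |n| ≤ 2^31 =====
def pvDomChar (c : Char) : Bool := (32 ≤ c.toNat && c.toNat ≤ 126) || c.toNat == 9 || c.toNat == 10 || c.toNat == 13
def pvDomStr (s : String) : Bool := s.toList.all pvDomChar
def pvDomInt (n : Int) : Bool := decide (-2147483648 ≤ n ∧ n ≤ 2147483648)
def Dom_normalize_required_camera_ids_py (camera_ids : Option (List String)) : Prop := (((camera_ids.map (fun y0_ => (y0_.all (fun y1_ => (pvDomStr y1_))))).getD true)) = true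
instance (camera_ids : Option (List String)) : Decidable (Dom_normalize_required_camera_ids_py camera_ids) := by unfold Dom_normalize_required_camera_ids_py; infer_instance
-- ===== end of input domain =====

-- B replaces A's two append loops by one rank-recording pass plus a stable sort
-- of the fixed canonical list (an alternative decomposition, same cost).

-- ===== PORT A =====
def canonicalRequiredCameraIds : List String := ["left", "right", "wrist"]

def cameraAliasToCanonical : PySem.Dict String String := PySem.Dict.ofList
  [("left", "left"), ("left_wrist", "left"), ("side", "left"),
   ("right", "right"), ("head", "right"), ("overhead", "right"),
   ("wrist", "wrist"), ("hand", "wrist"), ("eye_in_hand", "wrist")]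

def normalize_required_camera_ids_py (camera_ids : Option (List String)) : List String :=
  let normalized : List String := (camera_ids.getD []).foldl (fun normalized camera_id =>
    let al := PySem.Str.lower (PySem.Str.strip camera_id)
    if al = "" then normalized
    else
      let canonical := cameraAliasToCanonical.getD al al
      if canonical ∈ canonicalRequiredCameraIds ∧ canonical ∉ normalized then
        normalized ++ [canonical]
      else normalized) []
  canonicalRequiredCameraIds.foldl (fun normalized required =>
    if required ∉ normalized then normalized ++ [required] else normalized) normalized

-- ===== PORT B =====
def normalize_required_camera_ids_py_alt (camera_ids : Option (List String)) : List String :=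
  let order : PySem.Dict String Int := (camera_ids.getD []).foldl (fun order camera_id =>
    let al := PySem.Str.lower (PySem.Str.strip camera_id)
    let canonical := cameraAliasToCanonical.getD al al
    if canonical ∈ canonicalRequiredCameraIds ∧ order.contains canonical = false then
      order.insert canonical (order.size : Int)
    else order) PySem.Dict.empty
  PySem.List.sorted canonicalRequiredCameraIds
    (fun c => order.getD c ((canonicalRequiredCameraIds.length : Int))) false

-- ===== PRECONDITION & SPEC =====
def Spec_normalize_required_camera_ids_py (camera_ids : Option (List String)) (out : List String) : Prop := out = normalize_required_camera_ids_py_alt camera_ids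
instance (camera_ids : Option (List String)) (out : List String) : Decidable (Spec_normalize_required_camera_ids_py camera_ids out) := by unfold Spec_normalize_required_camera_ids_py; infer_instance

-- ===== CLAIM (what is proved, stated in full; the proofs are below) =====
def Claim_equal_normalize_required_camera_ids_py : Prop := ∀ (camera_ids : Option (List String)), Dom_normalize_required_camera_ids_py camera_ids → Spec_normalize_required_camera_ids_py camera_ids (normalize_required_camera_ids_py camera_ids)

-- ===== LEMMAS AND PROOFS =====

-- named (definitionally equal) forms of the three loop bodies of the two ports
def canonOf (camera_id : String) : String :=
  cameraAliasToCanonical.getD (PySem.Str.lower (PySem.Str.strip camera_id))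
    (PySem.Str.lower (PySem.Str.strip camera_id))

def stepA (normalized : List String) (camera_id : String) : List String :=
  if PySem.Str.lower (PySem.Str.strip camera_id) = "" then normalized
  else if canonOf camera_id ∈ canonicalRequiredCameraIds ∧ canonOf camera_id ∉ normalized then
    normalized ++ [canonOf camera_id]
  else normalized

def stepFin (normalized : List String) (required : String) : List String :=
  if required ∉ normalized then normalized ++ [required] else normalized

def stepB (order : PySem.Dict String Int) (camera_id : String) : PySem.Dict String Int :=
  if canonOf camera_id ∈ canonicalRequiredCameraIds ∧ order.contains (canonOf camera_id) = false then
    order.insert (canonOf camera_id) (order.size : Int)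
  else order

-- the dict B builds after A's first loop has produced `n`: each id paired with its rank
def mkRank : List String → Int → List (String × Int)
  | [], _ => []
  | c :: t, i => (c, i) :: mkRank t (i + 1)

lemma mkRank_contains_false (n : List String) (i : Int) (c : String) (hn : c ∉ n) :
    (PySem.Dict.mk (mkRank n i)).contains c = false := by
  induction n generalizing i with
  | nil => rfl
  | cons a t ih =>
    simp only [List.mem_cons, not_or] at hn
    simp only [mkRank, PySem.Dict.contains, List.any_cons]
    have h1 : (a == c) = false := beq_eq_false_iff_ne.mpr (fun h => hn.1 h.symm)
    have h2 := ih (i + 1) hn.2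
    simp only [PySem.Dict.contains] at h2
    simp [h1, h2]

lemma mkRank_contains_true (n : List String) (i : Int) (c : String) (hn : c ∈ n) :
    (PySem.Dict.mk (mkRank n i)).contains c = true := by
  induction n generalizing i with
  | nil => exact absurd hn (by simp)
  | cons a t ih =>
    simp only [mkRank, PySem.Dict.contains, List.any_cons]
    rcases List.mem_cons.mp hn with rfl | hmem
    · simp
    · have h2 := ih (i + 1) hmem
      simp only [PySem.Dict.contains] at h2
      simp [h2]

lemma mkRank_length (n : List String) (i : Int) : (mkRank n i).length = n.length := by
  induction n generalizing i with
  | nil => rfl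
  | cons a t ih => simp [mkRank, ih]

lemma mkRank_append (n : List String) (c : String) (i : Int) :
    mkRank (n ++ [c]) i = mkRank n i ++ [(c, i + (n.length : Int))] := by
  induction n generalizing i with
  | nil => simp [mkRank]
  | cons a t ih => simp [mkRank, ih (i + 1)]; ring

-- B's loop body tracks A's: its dict is A's list with ranks attached
lemma stepB_mk (n : List String) (x : String) :
    stepB (PySem.Dict.mk (mkRank n 0)) x = PySem.Dict.mk (mkRank (stepA n x) 0) := by
  unfold stepA stepB
  by_cases h0 : PySem.Str.lower (PySem.Str.strip x) = ""
  · have hcan : canonOf x = "" := by simp [canonOf, h0]; decide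
    rw [if_pos h0, if_neg (by rw [hcan]; rintro ⟨h, -⟩; exact absurd h (by decide))]
  · rw [if_neg h0]
    by_cases hc : canonOf x ∈ canonicalRequiredCameraIds
    · by_cases hn : canonOf x ∈ n
      · rw [if_neg (fun h => by rw [mkRank_contains_true n 0 _ hn] at h; exact absurd h.2 (by simp)),
            if_neg (fun h => h.2 hn)]
      · have hcont := mkRank_contains_false n 0 _ hn
        rw [if_pos ⟨hc, hcont⟩, if_pos ⟨hc, hn⟩]
        simp [PySem.Dict.insert, hcont, PySem.Dict.size, mkRank_length, mkRank_append]
    · rw [if_neg (fun h => hc h.1), if_neg (fun h => hc h.1)]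

lemma loop_eq (xs : List String) : ∀ (n : List String),
    xs.foldl stepB (PySem.Dict.mk (mkRank n 0))
      = PySem.Dict.mk (mkRank (xs.foldl stepA n) 0) := by
  induction xs with
  | nil => intro n; rfl
  | cons x t ih => intro n; simp only [List.foldl_cons, stepB_mk]; exact ih _

-- A's loop state stays a nodup list of canonical ids
set_option maxHeartbeats 1000000 in
lemma foldA_inv (xs : List String) : ∀ (n : List String), n.Nodup →
    (∀ x ∈ n, x ∈ canonicalRequiredCameraIds) →
    (xs.foldl stepA n).Nodup ∧ (∀ x ∈ xs.foldl stepA n, x ∈ canonicalRequiredCameraIds) := by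
  induction xs with
  | nil => intro n h1 h2; exact ⟨h1, h2⟩
  | cons x t ih =>
    intro n h1 h2
    simp only [List.foldl_cons]
    unfold stepA
    split
    · exact ih n h1 h2
    · split
      case isTrue h =>
        refine ih _ ?_ ?_
        · rw [List.nodup_append]
          refine ⟨h1, by simp, ?_⟩
          intro a ha b hb hab
          exact h.2 (List.mem_singleton.mp hb ▸ hab ▸ ha)
        · intro y hy
          rcases List.mem_append.mp hy with hy | hy
          · exact h2 y hy
          · exact (List.mem_singleton.mp hy) ▸ h.1
      case isFalse h => exact ih n h1 h2

-- every reachable state of A's first loop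
def allStates : List (List String) :=
  [[], ["left"], ["right"], ["wrist"],
   ["left", "right"], ["left", "wrist"], ["right", "left"],
   ["right", "wrist"], ["wrist", "left"], ["wrist", "right"],
   ["left", "right", "wrist"], ["left", "wrist", "right"],
   ["right", "left", "wrist"], ["right", "wrist", "left"],
   ["wrist", "left", "right"], ["wrist", "right", "left"]]

lemma state_mem (n : List String) (hsub : ∀ x ∈ n, x ∈ canonicalRequiredCameraIds)
    (hnd : n.Nodup) : n ∈ allStates := by
  rcases n with _ | ⟨a, _ | ⟨b, _ | ⟨c, _ | ⟨d, t⟩⟩⟩⟩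
  · decide
  · have ha := hsub a (by simp)
    simp [canonicalRequiredCameraIds] at ha
    rcases ha with rfl | rfl | rfl <;> decide
  · have ha := hsub a (by simp); have hb := hsub b (by simp)
    simp [canonicalRequiredCameraIds] at ha hb
    rcases ha with rfl | rfl | rfl <;> rcases hb with rfl | rfl | rfl <;> simp_all <;> decide
  · have ha := hsub a (by simp); have hb := hsub b (by simp); have hc := hsub c (by simp)
    simp [canonicalRequiredCameraIds] at ha hb hc
    rcases ha with rfl | rfl | rfl <;> rcases hb with rfl | rfl | rfl <;>
      rcases hc with rfl | rfl | rfl <;> simp_all <;> decide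
  · exfalso
    have ha := hsub a (by simp); have hb := hsub b (by simp)
    have hc := hsub c (by simp); have hd := hsub d (by simp)
    simp [canonicalRequiredCameraIds] at ha hb hc hd
    rcases ha with rfl | rfl | rfl <;> rcases hb with rfl | rfl | rfl <;>
      rcases hc with rfl | rfl | rfl <;> rcases hd with rfl | rfl | rfl <;> simp_all

set_option maxHeartbeats 1000000 in
lemma final_eq (n : List String) (hn : n ∈ allStates) :
    canonicalRequiredCameraIds.foldl stepFin n
    = PySem.List.sorted canonicalRequiredCameraIds
        (fun c => (PySem.Dict.mk (mkRank n 0)).getD c ((canonicalRequiredCameraIds.length : Int))) false := by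
  simp only [allStates, List.mem_cons, List.not_mem_nil, or_false] at hn
  rcases hn with rfl | rfl | rfl | rfl | rfl | rfl | rfl | rfl | rfl | rfl | rfl | rfl | rfl | rfl | rfl | rfl <;> decide

-- ===== VERDICT (by name: the statement is the Claim_ definition above) =====
theorem normalize_required_camera_ids_py_spec : Claim_equal_normalize_required_camera_ids_py := by
  intro camera_ids _
  show canonicalRequiredCameraIds.foldl stepFin ((camera_ids.getD []).foldl stepA [])
    = PySem.List.sorted canonicalRequiredCameraIds
        (fun c => ((camera_ids.getD []).foldl stepB (PySem.Dict.mk (mkRank [] 0))).getD c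
          ((canonicalRequiredCameraIds.length : Int))) false
  rw [loop_eq (camera_ids.getD []) []]
  have hinv := foldA_inv (camera_ids.getD []) [] (by simp) (by simp)
  exact final_eq _ (state_mem _ hinv.2 hinv.1)
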